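-- pv_equiv track=rewrite | github.com/Srinath-N-R/Resume-Summarizer | resume_parser.py | extract_latest_org_with_date
-- ===== SOURCE A (Python) =====
-- def extract_latest_org_with_date(orgs_and_dates):
--     if not orgs_and_dates:
--         return None, None
--
--     # Filter out organizations with the label "SKILLS" (incorrectly extracted)
--     orgs_and_dates = [(org, year) for org, year in orgs_and_dates if org != "SKILLS"]
--
--     if not orgs_and_dates:
--         return None, None
--
--     # Find the latest year mentioned
--     latest_year = max(orgs_and_dates, key=lambda x: int(x[1]))[1]
--
--     # Filter organizations with the latest year
--     latest_orgs = [org for org, year in orgs_and_dates if year == latest_year]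
--
--     # If there are multiple organizations with the same latest year, choose the first one
--     latest_org = latest_orgs[0]
--
--     return latest_org, latest_year
-- ===== SOURCE B (Python) =====
-- def extract_latest_org_with_date(orgs_and_dates):
--     # Single pass: keep the first entry (org, raw year) with the strictly largest int(year).
--     best = None  # (org, year, int(year))
--     for org, year in orgs_and_dates:
--         if org == "SKILLS":
--             continue
--         y = int(year)
--         if best is None or y > best[2]:
--             best = (org, year, y)
--     if best is None:
--         return None, None
--     return best[0], best[1]
-- ===== Notes on version B (the rewrite author's own statement) =====
-- stated objective: simpler
-- what changed: Replaces A's three passes (filter out SKILLS into a new list, max() with an int key, then a second filter plus indexing) with one loop over the input that keeps the first entry with the strictly largest int(year).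
import Mathlib
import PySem

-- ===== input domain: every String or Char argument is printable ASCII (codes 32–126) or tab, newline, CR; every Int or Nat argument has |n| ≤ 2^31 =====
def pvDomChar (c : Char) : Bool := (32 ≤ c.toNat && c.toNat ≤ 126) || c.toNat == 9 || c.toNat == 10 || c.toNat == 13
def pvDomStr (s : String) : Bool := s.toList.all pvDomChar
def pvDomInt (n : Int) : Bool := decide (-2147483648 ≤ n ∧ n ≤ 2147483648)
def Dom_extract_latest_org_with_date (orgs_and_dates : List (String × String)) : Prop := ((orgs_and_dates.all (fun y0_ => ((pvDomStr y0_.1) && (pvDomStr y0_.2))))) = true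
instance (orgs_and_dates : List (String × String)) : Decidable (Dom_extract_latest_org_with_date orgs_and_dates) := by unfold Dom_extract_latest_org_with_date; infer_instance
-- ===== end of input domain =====

-- ===== PORT A =====
-- B is one accumulator loop instead of A's three passes; same return value on Pre_ (no mutation involved).
-- key(x) = int(x[1]); under Pre_ every non-SKILLS year parses, so getD 0 is never reached on admitted inputs.
def pvKey (p : String × String) : Int := (PySem.Int.ofStr? p.2).getD 0

def extract_latest_org_with_date (orgs_and_dates : List (String × String)) : Option String × Option String :=
  if orgs_and_dates = [] then (none, none)
  else
    let filtered := orgs_and_dates.filter (fun p => p.1 != "SKILLS")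
    if filtered = [] then (none, none)
    else
      match PySem.List.max? filtered pvKey with
      | none => (none, none)  -- unreachable: filtered ≠ []
      | some m =>
        let latest_year := m.2
        let latest_orgs := (filtered.filter (fun p => p.2 == latest_year)).map Prod.fst
        match latest_orgs with
        | [] => (none, none)  -- unreachable: m itself survives the filter
        | o :: _ => (some o, some latest_year)

-- ===== PORT B =====
def pvBStep (acc : Option (String × String × Int)) (p : String × String) :
    Option (String × String × Int) :=
  if p.1 == "SKILLS" then acc
  else
    let y := (PySem.Int.ofStr? p.2).getD 0
    match acc with
    | none => some (p.1, p.2, y)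
    | some b => if b.2.2 < y then some (p.1, p.2, y) else some b

def extract_latest_org_with_date_alt (orgs_and_dates : List (String × String)) :
    Option String × Option String :=
  match orgs_and_dates.foldl pvBStep none with
  | none => (none, none)
  | some b => (some b.1, some b.2.1)

-- ===== PRECONDITION & SPEC =====
-- Pre_: Python's int(year) raises ValueError on unparseable year strings of entries that survive
-- the SKILLS filter; exactly those inputs are excluded.
def Pre_extract_latest_org_with_date (orgs_and_dates : List (String × String)) : Prop :=
  ∀ p ∈ orgs_and_dates, p.1 ≠ "SKILLS" → (PySem.Int.ofStr? p.2).isSome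

instance (orgs_and_dates : List (String × String)) :
    Decidable (Pre_extract_latest_org_with_date orgs_and_dates) := by
  unfold Pre_extract_latest_org_with_date; infer_instance

def pvWitness_extract_latest_org_with_date : (List (String × String)) :=
  [("Acme", "2019"), ("SKILLS", "n/a"), ("Beta", "2021")]

def Spec_extract_latest_org_with_date (orgs_and_dates : List (String × String)) (out : Option String × Option String) : Prop := out = extract_latest_org_with_date_alt orgs_and_dates
instance (orgs_and_dates : List (String × String)) (out : Option String × Option String) : Decidable (Spec_extract_latest_org_with_date orgs_and_dates out) := by unfold Spec_extract_latest_org_with_date; infer_instance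

-- ===== CLAIM (what is proved, stated in full; the proofs are below) =====
def Claim_equal_extract_latest_org_with_date : Prop := ∀ (orgs_and_dates : List (String × String)), Dom_extract_latest_org_with_date orgs_and_dates → Pre_extract_latest_org_with_date orgs_and_dates → Spec_extract_latest_org_with_date orgs_and_dates (extract_latest_org_with_date orgs_and_dates)

-- ===== LEMMAS AND PROOFS =====

-- A's max()-step (exactly the fold step of PySem.List.max? with key pvKey)
def pvAStep (acc : Option (String × String)) (x : String × String) : Option (String × String) :=
  match acc with
  | none => some x
  | some m => if pvKey m < pvKey x then some x else some m

def pvEm (m : String × String) : String × String × Int := (m.1, m.2, pvKey m)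

lemma pvMax?_eq_foldl (xs : List (String × String)) :
    PySem.List.max? xs pvKey = xs.foldl pvAStep none := by
  unfold PySem.List.max?
  congr 1
  funext acc x
  cases acc <;> rfl

-- B's fused loop equals the SKILLS-filter followed by the max?-fold.
lemma pvFoldB (l : List (String × String)) (acc : Option (String × String)) :
    l.foldl pvBStep (acc.map pvEm) =
      ((l.filter (fun p => p.1 != "SKILLS")).foldl pvAStep acc).map pvEm := by
  induction l generalizing acc with
  | nil => rfl
  | cons p t ih =>
    by_cases hp : p.1 = "SKILLS"
    · simp [List.foldl_cons, pvBStep, hp, ih]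
    · have hp' : (p.1 == "SKILLS") = false := by simp [hp]
      have hkey : ∀ q : String × String, (PySem.Int.ofStr? q.2).getD 0 = pvKey q :=
        fun _ => rfl
      have hp2 : (p.1 != "SKILLS") = true := by simp [hp]
      cases acc with
      | none =>
        simpa [List.foldl_cons, pvBStep, hp', hp2, List.filter_cons, pvAStep, pvEm, hkey] using ih (acc := some p)
      | some m =>
        by_cases hlt : pvKey m < pvKey p
        · simpa [List.foldl_cons, pvBStep, hp', hp2, List.filter_cons, pvAStep, pvEm, hkey, hlt]
            using ih (acc := some p)
        · simpa [List.foldl_cons, pvBStep, hp', hp2, List.filter_cons, pvAStep, pvEm, hkey, hlt]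
            using ih (acc := some m)

-- The max?-fold returns the FIRST maximum: everything strictly before it has smaller key.
lemma pvMaxFirst (xs : List (String × String)) (acc : Option (String × String))
    (m : String × String) (h : xs.foldl pvAStep acc = some m) :
    acc = some m ∨
      ∃ t₁ t₂, xs = t₁ ++ m :: t₂ ∧ (∀ y ∈ t₁, pvKey y < pvKey m) ∧
        (∀ a, acc = some a → pvKey a < pvKey m) := by
  induction xs generalizing acc with
  | nil => exact Or.inl h
  | cons x t ih =>
    rw [List.foldl_cons] at h
    rcases ih (pvAStep acc x) h with h1 | ⟨t₁, t₂, ht, hlt, hacc⟩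
    · cases acc with
      | none =>
        right
        cases h1
        exact ⟨[], t, rfl, by simp, by simp⟩
      | some a =>
        by_cases hc : pvKey a < pvKey x
        · right
          have hm : x = m := by simpa [pvAStep, hc] using h1
          subst hm
          exact ⟨[], t, rfl, by simp, by intro b hb; injection hb with h; rw [← h]; exact hc⟩
        · left
          simpa [pvAStep, hc] using h1
    · right
      -- pvAStep acc x = some a for some a with pvKey x ≤ pvKey a
      obtain ⟨a, ha, hxa, haa⟩ :
          ∃ a, pvAStep acc x = some a ∧ pvKey x ≤ pvKey a ∧
            (∀ a0, acc = some a0 → pvKey a0 ≤ pvKey a) := by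
        cases acc with
        | none => exact ⟨x, rfl, le_refl _, by simp⟩
        | some a0 =>
          by_cases hc : pvKey a0 < pvKey x
          · exact ⟨x, by simp [pvAStep, hc], le_refl _,
              by intro b hb; injection hb with h; rw [← h]; exact le_of_lt hc⟩
          · exact ⟨a0, by simp [pvAStep, hc], le_of_not_gt hc, by intro b hb; injection hb with h; rw [← h]⟩
      have ham : pvKey a < pvKey m := hacc a ha
      refine ⟨x :: t₁, t₂, by rw [ht]; rfl, ?_, ?_⟩
      · intro y hy
        rcases List.mem_cons.mp hy with rfl | hy'
        · exact lt_of_le_of_lt hxa ham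
        · exact hlt y hy'
      · intro a0 h0
        exact lt_of_le_of_lt (haa a0 h0) ham

-- equal year strings give equal keys
lemma pvKey_congr {y m : String × String} (h : y.2 = m.2) : pvKey y = pvKey m := by
  simp [pvKey, h]

lemma pvLatestHead (f : List (String × String)) (m : String × String)
    (h : PySem.List.max? f pvKey = some m) :
    ∃ r, (f.filter (fun p => p.2 == m.2)).map Prod.fst = m.1 :: r := by
  rw [pvMax?_eq_foldl] at h
  rcases pvMaxFirst f none m h with h1 | ⟨t₁, t₂, ht, hlt, -⟩
  · cases h1
  · subst ht
    have hfil : t₁.filter (fun p => p.2 == m.2) = [] := by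
      apply List.filter_eq_nil_iff.mpr
      intro y hy
      simp only [beq_iff_eq]
      intro heq
      exact absurd (pvKey_congr heq) (ne_of_lt (hlt y hy))
    refine ⟨((t₂.filter (fun p => p.2 == m.2)).map Prod.fst), ?_⟩
    simp [List.filter_append, hfil]

-- ===== VERDICT (by name: the statement is the Claim_ definition above) =====
theorem extract_latest_org_with_date_spec : Claim_equal_extract_latest_org_with_date := by
  intro l _ _
  unfold Spec_extract_latest_org_with_date extract_latest_org_with_date
    extract_latest_org_with_date_alt
  have hfold := pvFoldB l (acc := none)
  simp only [Option.map_none] at hfold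
  rw [hfold, ← pvMax?_eq_foldl]
  by_cases hl : l = []
  · subst hl; rfl
  · simp only [hl, if_false]
    set f := l.filter (fun p => p.1 != "SKILLS") with hf
    by_cases hfe : f = []
    · simp [hfe, PySem.List.max?]
    · simp only [hfe, if_false]
      rcases Option.ne_none_iff_exists'.mp
        (fun hn => hfe ((PySem.List.max?_eq_none_iff f pvKey).mp hn)) with ⟨m, hm⟩
      rw [hm]
      rcases pvLatestHead f m hm with ⟨r, hr⟩
      simp [hr, pvEm]
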